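-- pv_equiv track=rewrite | github.com/AtillaYasar/AI_powered-writing-tool | main.py | text_to_messages
-- ===== SOURCE A (Python) =====
-- def text_to_messages(text):
--     lines = text.split('\n')
--     blocks = []
--     current_block = []
--     for line in lines:
--         if line == '-----':
--             blocks.append(current_block)
--             current_block = []
--         else:
--             current_block.append(line)
--     if current_block != []:
--         blocks.append(current_block)
--     messages = []
--     for block in blocks:
--         messages.append({
--             'role': block[0],
--             'content': '\n'.join(block[1:]),
--         })
--     return messages
-- ===== SOURCE B (Python) =====
-- def text_to_messages(text):
--     lines = text.split('\n')
--     seps = [i for i, l in enumerate(lines) if l == '-----']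
--     blocks = []
--     prev = 0
--     for i in seps:
--         blocks.append(lines[prev:i])
--         prev = i + 1
--     tail = lines[prev:]
--     if tail:
--         blocks.append(tail)
--     return [{'role': b[0], 'content': '\n'.join(b[1:])} for b in blocks]
-- ===== Notes on version B (the rewrite author's own statement) =====
-- stated objective: alternative
-- what changed: Instead of A's single stateful scan that grows a current_block accumulator, B first indexes all separator-line positions, then reconstructs blocks by slicing the line list between consecutive separators, and maps the blocks to messages in one comprehension.
import Mathlib
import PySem

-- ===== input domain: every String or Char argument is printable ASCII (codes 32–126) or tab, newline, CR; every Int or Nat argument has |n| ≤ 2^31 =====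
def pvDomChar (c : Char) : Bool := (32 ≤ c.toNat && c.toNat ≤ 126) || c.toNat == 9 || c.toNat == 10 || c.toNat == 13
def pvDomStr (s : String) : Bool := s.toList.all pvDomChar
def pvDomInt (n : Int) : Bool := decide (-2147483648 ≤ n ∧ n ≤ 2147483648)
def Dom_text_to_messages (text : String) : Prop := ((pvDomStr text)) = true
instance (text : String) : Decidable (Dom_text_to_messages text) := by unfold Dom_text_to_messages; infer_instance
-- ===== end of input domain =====

-- B replaces A's single stateful accumulator scan by: index all separator-line positions, rebuild blocks by slicing between them, map blocks to messages (alternative decomposition, same cost; return-value equivalence).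


-- the dict construction shared by both Pythons: {'role': block[0], 'content': '\n'.join(block[1:])}
-- (block[0] raises IndexError on an empty block in Python; Pre_ excludes those inputs, the .getD "" is unreachable there)
def pvMsg (b : List String) : List (String × String) :=
  [("role", (PySem.List.pyGet? b (0 : Int)).getD ""), ("content", PySem.Str.join "\n" (PySem.List.slice b (some (1 : Int)) none))]

-- ===== PORT A =====
def text_to_messages (text : String) : List (List (String × String)) :=
  let lines := (PySem.Str.split? text "\n").getD []   -- text.split('\n'); separator nonempty, so split? is some
  let st := lines.foldl
    (fun (s : List (List String) × List String) line =>
      if line = "-----" then (s.1 ++ [s.2], []) else (s.1, s.2 ++ [line])) ([], [])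
  let blocks := if st.2 = [] then st.1 else st.1 ++ [st.2]
  blocks.foldl (fun ms b => ms ++ [pvMsg b]) []

-- ===== PORT B =====
def text_to_messages_alt (text : String) : List (List (String × String)) :=
  let lines := (PySem.Str.split? text "\n").getD []
  let seps := ((PySem.List.enumerate lines 0).filter (fun q => q.2 = "-----")).map (·.1)
  let st := seps.foldl
    (fun (s : List (List String) × Int) i =>
      (s.1 ++ [PySem.List.slice lines (some s.2) (some i)], i + 1)) ([], 0)
  let tail := PySem.List.slice lines (some st.2) none
  let blocks := if tail = [] then st.1 else st.1 ++ [tail]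
  blocks.map pvMsg

-- ===== PRECONDITION & SPEC =====
-- Pre_ excludes exactly the inputs where Python A raises IndexError (block[0] on an empty internal block):
-- a separator line as the first line, or two consecutive separator lines.  (Python B raises there too.)
def Pre_text_to_messages (text : String) : Prop :=
  let lines := (PySem.Str.split? text "\n").getD []
  lines.head? ≠ some "-----" ∧ lines.IsChain (fun a b => ¬(a = "-----" ∧ b = "-----"))
instance (text : String) : Decidable (Pre_text_to_messages text) := by unfold Pre_text_to_messages; infer_instance

def pvWitness_text_to_messages : String := "user\nhello there\n-----\nassistant\nhi"

def Spec_text_to_messages (text : String) (out : List (List (String × String))) : Prop := out = text_to_messages_alt text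
instance (text : String) (out : List (List (String × String))) : Decidable (Spec_text_to_messages text out) := by unfold Spec_text_to_messages; infer_instance

-- ===== CLAIM (what is proved, stated in full; the proofs are below) =====
def Claim_equal_text_to_messages : Prop := ∀ (text : String), Dom_text_to_messages text → Pre_text_to_messages text → Spec_text_to_messages text (text_to_messages text)

-- ===== LEMMAS AND PROOFS =====

-- reference splitter: blocks of `ls` separated by "-----" lines, running block `cur`; a trailing empty block is dropped
def refAux (cur : List String) : List String → List (List String)
  | [] => if cur = [] then [] else [cur]
  | l :: ls => if l = "-----" then cur :: refAux [] ls else refAux (cur ++ [l]) ls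

-- A's accumulator loop (plus the final trailing-block test) computes refAux
theorem lemA (ls : List String) : ∀ (bs : List (List String)) (cur : List String),
    (let st := ls.foldl
        (fun (s : List (List String) × List String) line =>
          if line = "-----" then (s.1 ++ [s.2], []) else (s.1, s.2 ++ [line])) (bs, cur);
     if st.2 = [] then st.1 else st.1 ++ [st.2]) = bs ++ refAux cur ls := by
  induction ls with
  | nil => intro bs cur; by_cases h : cur = [] <;> simp [refAux, h]
  | cons l ls ih =>
    intro bs cur
    by_cases h : l = "-----"
    · subst h
      simp only [List.foldl_cons, if_true]
      rw [ih (bs ++ [cur]) []]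
      simp [refAux]
    · simp only [List.foldl_cons, if_neg h]
      rw [ih bs (cur ++ [l])]
      simp [refAux, h]

-- the separator indices of `ls`, as B computes them (start index k)
def sepIdx (ls : List String) (k : Int) : List Int :=
  ((PySem.List.enumerate ls k).filter (fun q => q.2 = "-----")).map (·.1)

theorem sepIdx_cons (x : String) (ls : List String) (k : Int) :
    sepIdx (x :: ls) k = if x = "-----" then k :: sepIdx ls (k + 1) else sepIdx ls (k + 1) := by
  by_cases h : x = "-----" <;> simp [sepIdx, PySem.List.enumerate_cons, h]

-- B's slicing loop also computes refAux: invariant over the global list L with cursor p and sep-free prefix cur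
theorem lemB (ls : List String) : ∀ (L : List String) (p : Nat) (cur : List String) (bs : List (List String)),
    L.drop p = cur ++ ls → "-----" ∉ cur →
    (let st := (sepIdx ls ((p : Int) + (cur.length : Int))).foldl
        (fun (s : List (List String) × Int) i =>
          (s.1 ++ [PySem.List.slice L (some s.2) (some i)], i + 1)) (bs, (p : Int));
     let tail := PySem.List.slice L (some st.2) none;
     if tail = [] then st.1 else st.1 ++ [tail]) = bs ++ refAux cur ls := by
  induction ls with
  | nil =>
    intro L p cur bs h _
    simp only [sepIdx, PySem.List.enumerate_nil, List.filter_nil, List.map_nil, List.foldl_nil]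
    rw [PySem.List.slice_from_natCast, h]
    by_cases hc : cur = [] <;> simp [refAux, hc]
  | cons x ls ih =>
    intro L p cur bs h hcur
    rw [sepIdx_cons]
    by_cases hx : x = "-----"
    · subst hx
      simp only [if_true, List.foldl_cons]
      have hslice : PySem.List.slice L (some (p : Int)) (some ((p : Int) + (cur.length : Int))) = cur := by
        rw [PySem.List.slice_natCast_add, h, List.take_append_of_le_length (le_refl _), List.take_length]
      rw [hslice]
      have hdrop : L.drop (p + cur.length + 1) = [] ++ ls := by
        have h2 : L.drop (p + cur.length + 1) = (L.drop p).drop (cur.length + 1) := by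
          rw [List.drop_drop]; ring_nf
        rw [h2, h]
        simp
      have key := ih L (p + cur.length + 1) [] (bs ++ [cur]) hdrop (by simp)
      simp only [List.length_nil, Nat.cast_zero, add_zero, Nat.cast_add, Nat.cast_one] at key
      rw [key]
      simp [refAux]
    · simp only [if_neg hx]
      have hdrop : L.drop p = (cur ++ [x]) ++ ls := by rw [h]; simp
      have hnc : "-----" ∉ cur ++ [x] := by
        simp only [List.mem_append, List.mem_singleton]
        rintro (hc | hc)
        · exact hcur hc
        · exact hx hc.symm
      have key := ih L p (cur ++ [x]) bs hdrop hnc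
      simp only [List.length_append, List.length_cons, List.length_nil, Nat.cast_add, Nat.cast_one, zero_add] at key
      rw [show ((p : Int) + (cur.length : Int) + 1) = ((p : Int) + ((cur.length : Int) + 1)) by ring]
      rw [key]
      simp [refAux, hx]

-- ===== VERDICT (by name: the statement is the Claim_ definition above) =====
theorem text_to_messages_spec : Claim_equal_text_to_messages := by
  intro text _ _
  unfold Spec_text_to_messages text_to_messages text_to_messages_alt
  set L := (PySem.Str.split? text "\n").getD [] with hL
  rw [PySem.List.foldl_append_singleton_eq_map, List.nil_append]
  have hA := lemA L [] []
  have hB := lemB L L 0 [] [] (by simp) (by simp)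
  simp only [List.length_nil, Nat.cast_zero, add_zero, List.nil_append] at hA hB
  rw [hA]
  congr 1
  rw [← hB]
  rfl
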